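-- pv_equiv track=rewrite | github.com/kswoong1819/Python-Algorithm | practice/2020/2020_07~09/0929/11st_1.py | solution
-- ===== SOURCE A (Python) =====
-- def solution(S):
--     cnt = 0
--     tmp = 0
--     for i in S:
--         if i == 'a':
--             tmp += 1
--             if tmp > 2:
--                 return -1
--         else:
--             cnt += 2 - tmp
--             tmp = 0
--     if tmp > 2:
--         return cnt
--     else:
--         cnt += 2 - tmp
--     return cnt
-- ===== SOURCE B (Python) =====
-- def solution(S):
--     if 'aaa' in S:
--         return -1
--     na = S.count('a')
--     return 2 * (len(S) - na + 1) - na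
-- ===== Notes on version B (the rewrite author's own statement) =====
-- stated objective: simpler
-- what changed: Replaced the stateful single-pass run-length loop with a substring containment check plus a closed-form arithmetic expression over the length and the count of 'a' characters.
import Mathlib
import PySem

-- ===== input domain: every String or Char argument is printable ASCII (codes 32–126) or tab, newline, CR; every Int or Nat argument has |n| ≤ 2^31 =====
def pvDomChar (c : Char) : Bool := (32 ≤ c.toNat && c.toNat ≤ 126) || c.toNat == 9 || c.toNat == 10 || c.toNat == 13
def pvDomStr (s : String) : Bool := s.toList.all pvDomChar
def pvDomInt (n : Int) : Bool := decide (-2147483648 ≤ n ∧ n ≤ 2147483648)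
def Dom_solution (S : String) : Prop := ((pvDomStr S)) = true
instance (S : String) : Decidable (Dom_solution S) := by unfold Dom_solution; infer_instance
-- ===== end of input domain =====

-- B replaces A's stateful run-length loop with a substring check ('aaa' in S) plus a closed-form expression (simpler).

-- ===== PORT A =====
-- A's for-loop, carrying (cnt, tmp); an 'a'-run reaching 3 returns -1 immediately
def solutionLoop : List Char → Int → Int → Int
  | [], cnt, tmp => if tmp > 2 then cnt else cnt + (2 - tmp)
  | c :: rest, cnt, tmp =>
    if c = 'a' then
      if tmp + 1 > 2 then -1 else solutionLoop rest cnt (tmp + 1)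
    else solutionLoop rest (cnt + (2 - tmp)) 0

def solution (S : String) : Int := solutionLoop S.toList 0 0

-- ===== PORT B =====
def solution_alt (S : String) : Int :=
  if PySem.Str.isIn "aaa" S then -1
  else
    2 * ((PySem.Str.len S : Int) - (PySem.Str.count S "a" : Int) + 1) - (PySem.Str.count S "a" : Int)

-- ===== PRECONDITION & SPEC =====
def Spec_solution (S : String) (out : Int) : Prop := out = solution_alt S
instance (S : String) (out : Int) : Decidable (Spec_solution S out) := by unfold Spec_solution; infer_instance

-- ===== CLAIM (what is proved, stated in full; the proofs are below) =====
def Claim_equal_solution : Prop := ∀ (S : String), Dom_solution S → Spec_solution S (solution S)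

-- ===== LEMMAS AND PROOFS =====

lemma chars_count_go_single (c : Char) :
    ∀ (fuel : Nat) (l : List Char) (acc : Nat), l.length ≤ fuel →
      PySem.Chars.count.go [c] fuel l acc = acc + l.count c := by
  intro fuel
  induction fuel with
  | zero =>
    intro l acc h
    have : l = [] := List.eq_nil_of_length_eq_zero (Nat.le_zero.mp h)
    subst this; simp [PySem.Chars.count.go]
  | succ n ih =>
    intro l acc h
    cases l with
    | nil => simp [PySem.Chars.count.go]
    | cons x t =>
      rw [List.length_cons] at h
      simp only [PySem.Chars.count.go]
      by_cases hx : x = c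
      · subst hx
        have hrec := ih (List.drop 1 (x :: t)) (acc + 1) (by simpa using Nat.le_of_succ_le_succ h)
        simp at hrec
        simp [List.isPrefixOf, hrec, List.count_cons]
        omega
      · have hpre : [c].isPrefixOf (x :: t) = false := by
          simp [List.isPrefixOf]
          exact fun hcx => hx hcx.symm
        simp [hpre, ih t acc (Nat.le_of_succ_le_succ h), List.count_cons, hx]

lemma chars_count_single (l : List Char) (c : Char) :
    PySem.Chars.count l [c] = l.count c := by
  simpa [PySem.Chars.count, List.isEmpty] using
    chars_count_go_single c l.length l 0 le_rfl

lemma countP_ne_count_add (l : List Char) : l.countP (fun c => !decide (c = 'a')) + l.count 'a' = l.length := by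
  induction l with
  | nil => simp
  | cons x t ih =>
    by_cases hx : x = 'a' <;> simp [List.count_cons, List.countP_cons, hx] <;> omega

lemma solutionLoop_closed (l : List Char) :
    ∀ (cnt : Int) (t : Nat), t ≤ 2 →
      solutionLoop l cnt (t : Int) =
        if List.replicate (3 - t) 'a' <+: l ∨ ['a','a','a'] <:+: l then -1
        else cnt + 2 * ((l.countP (fun c => !decide (c = 'a')) : Int) + 1) - (l.count 'a' : Int) - t := by
  induction l with
  | nil =>
    intro cnt t ht
    have h3 : ¬ (List.replicate (3 - t) 'a' <+: ([] : List Char) ∨ ['a','a','a'] <:+: ([] : List Char)) := by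
      rintro (h | h)
      · have := h.length_le; simp [List.length_replicate] at this; omega
      · have := h.length_le; simp at this
    rw [if_neg h3]
    have ht2 : ¬ ((t : Int) > 2) := by exact_mod_cast by omega
    simp [solutionLoop, ht2]
    push_cast; ring
  | cons x rest ih =>
    intro cnt t ht
    by_cases hx : x = 'a'
    · subst hx
      by_cases ht2 : t = 2
      · subst ht2
        have hp : List.replicate (3 - 2) 'a' <+: ('a' :: rest) := by
          simp [List.replicate]
        rw [if_pos (Or.inl hp)]
        norm_num [solutionLoop]
      · have ht1 : t ≤ 1 := by omega
        have hstep : ¬ ((t : Int) + 1 > 2) := by exact_mod_cast by omega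
        have hL : solutionLoop ('a' :: rest) cnt (t : Int) = solutionLoop rest cnt (((t + 1 : Nat) : Int)) := by
          rw [show solutionLoop ('a' :: rest) cnt (t : Int)
              = if ('a' : Char) = 'a' then (if (t : Int) + 1 > 2 then -1 else solutionLoop rest cnt ((t : Int) + 1))
                else solutionLoop rest (cnt + (2 - (t:Int))) 0 from rfl]
          rw [if_pos rfl, if_neg hstep]
          push_cast; ring_nf
        rw [hL, ih cnt (t + 1) (by omega)]
        have hcond : (List.replicate (3 - (t + 1)) 'a' <+: rest ∨ ['a','a','a'] <:+: rest) ↔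
            (List.replicate (3 - t) 'a' <+: ('a' :: rest) ∨ ['a','a','a'] <:+: ('a' :: rest)) := by
          have h3t : 3 - t = (3 - (t + 1)) + 1 := by omega
          constructor
          · rintro (h | h)
            · left
              rw [h3t, List.replicate_succ]
              exact List.cons_prefix_cons.mpr ⟨rfl, h⟩
            · exact Or.inr (h.trans (List.suffix_cons 'a' rest).isInfix)
          · rintro (h | h)
            · left
              rw [h3t, List.replicate_succ] at h
              exact (List.cons_prefix_cons.mp h).2
            · rcases List.infix_cons_iff.mp h with h | h
              · left
                have h2 : ['a','a'] <+: rest := (List.cons_prefix_cons.mp h).2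
                refine List.IsPrefix.trans ?_ h2
                interval_cases t <;> decide
              · exact Or.inr h
        rw [if_congr hcond rfl rfl]
        split_ifs with h
        · rfl
        · simp only [List.count_cons, List.countP_cons]
          push_cast
          norm_num
          ring
    · have hL : solutionLoop (x :: rest) cnt (t : Int) = solutionLoop rest (cnt + (2 - (t:Int))) ((0 : Nat) : Int) := by
        rw [show solutionLoop (x :: rest) cnt (t : Int)
            = if x = 'a' then (if (t : Int) + 1 > 2 then -1 else solutionLoop rest cnt ((t : Int) + 1))
              else solutionLoop rest (cnt + (2 - (t:Int))) 0 from rfl]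
        rw [if_neg hx]; norm_num
      rw [hL, ih (cnt + (2 - (t : Int))) 0 (by omega)]
      have hcond : (List.replicate (3 - 0) 'a' <+: rest ∨ ['a','a','a'] <:+: rest) ↔
          (List.replicate (3 - t) 'a' <+: (x :: rest) ∨ ['a','a','a'] <:+: (x :: rest)) := by
        have hrep3 : (List.replicate 3 'a' : List Char) = ['a','a','a'] := by decide
        constructor
        · rintro (h | h)
          · rw [show (3 - 0) = 3 from rfl, hrep3] at h
            exact Or.inr (h.isInfix.trans (List.suffix_cons x rest).isInfix)
          · exact Or.inr (h.trans (List.suffix_cons x rest).isInfix)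
        · rintro (h | h)
          · exfalso
            cases h3 : 3 - t with
            | zero => omega
            | succ n =>
              rw [h3, List.replicate_succ] at h
              exact hx ((List.cons_prefix_cons.mp h).1).symm
          · rcases List.infix_cons_iff.mp h with h | h
            · exact absurd (List.cons_prefix_cons.mp h).1.symm hx
            · exact Or.inr h
      rw [if_congr hcond rfl rfl]
      split_ifs with h
      · rfl
      · simp [List.count_cons, List.countP_cons, hx]
        push_cast
        ring

-- ===== VERDICT (by name: the statement is the Claim_ definition above) =====
theorem solution_spec : Claim_equal_solution := by
  intro S _
  unfold Spec_solution solution solution_alt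
  have hclosed := solutionLoop_closed S.toList 0 0 (by omega)
  norm_num at hclosed
  rw [hclosed]
  have htl : ("aaa" : String).toList = ['a','a','a'] := by decide
  have hcnt : PySem.Str.count S "a" = S.toList.count 'a' := by
    rw [PySem.Str.count_eq, show ("a" : String).toList = ['a'] from by decide, chars_count_single]
  have hlen : PySem.Str.len S = S.toList.length := by simp [PySem.Str.len_eq]
  have hrep : (List.replicate 3 'a' : List Char) = ['a','a','a'] := by decide
  by_cases hin : ['a','a','a'] <:+: S.toList
  · rw [if_pos (Or.inr hin), if_pos (by rw [PySem.Str.isIn_iff_infix, htl]; exact hin)]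
  · have hnc : ¬ (List.replicate 3 'a' <+: S.toList ∨ ['a','a','a'] <:+: S.toList) := by
      rintro (h | h)
      · exact hin (by rw [hrep] at h; exact h.isInfix)
      · exact hin h
    rw [if_neg hnc, if_neg (by rw [PySem.Str.isIn_iff_infix, htl]; exact hin)]
    have hc := countP_ne_count_add S.toList
    rw [hcnt, hlen]
    push_cast
    omega
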